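-- pv_equiv track=rewrite | github.com/murning/EEE4022S_Final_Year_Project | localisation_hardware/rotate.py | get_45_deg_rotation
-- ===== SOURCE A (Python) =====
-- def get_45_deg_rotation(doa_list, current_position):
--     flatten_list = [j for sub in doa_list for j in sub]
--
--     first_quadrant = len([i for i in flatten_list if 0 <= i < 90])
--     second_quadrant = len([i for i in flatten_list if 90 <= i < 180])
--     third_quadrant = len([i for i in flatten_list if 180 <= i < 270])
--     fourth_quadrant = len([i for i in flatten_list if 270 <= i < 360])
--
--     max_quadrant = max([first_quadrant, second_quadrant, third_quadrant, fourth_quadrant])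
--
--     if max_quadrant == first_quadrant:
--         angle = 315
--     elif max_quadrant == second_quadrant:
--         angle = 45
--     elif max_quadrant == third_quadrant:
--         angle = 135
--     elif max_quadrant == fourth_quadrant:
--         angle = 225
--     else:
--         angle = 0
--
--     rotation = angle - current_position
--
--     return rotation
-- ===== SOURCE B (Python) =====
-- def get_45_deg_rotation(doa_list, current_position):
--     counts = [0, 0, 0, 0]
--     for sub in doa_list:
--         for i in sub:
--             if 0 <= i < 360:
--                 counts[i // 90] += 1
--     angle, best = 315, counts[0]
--     for q, a in ((1, 45), (2, 135), (3, 225)):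
--         if counts[q] > best:
--             angle, best = a, counts[q]
--     return angle - current_position
-- ===== Notes on version B (the rewrite author's own statement) =====
-- stated objective: faster
-- what changed: Replaces flattening plus four separate filter passes, a max, and an equality if-chain with one nested pass that builds a 4-entry count table indexed by i // 90, followed by a first-match argmax scan of the table.
import Mathlib
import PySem

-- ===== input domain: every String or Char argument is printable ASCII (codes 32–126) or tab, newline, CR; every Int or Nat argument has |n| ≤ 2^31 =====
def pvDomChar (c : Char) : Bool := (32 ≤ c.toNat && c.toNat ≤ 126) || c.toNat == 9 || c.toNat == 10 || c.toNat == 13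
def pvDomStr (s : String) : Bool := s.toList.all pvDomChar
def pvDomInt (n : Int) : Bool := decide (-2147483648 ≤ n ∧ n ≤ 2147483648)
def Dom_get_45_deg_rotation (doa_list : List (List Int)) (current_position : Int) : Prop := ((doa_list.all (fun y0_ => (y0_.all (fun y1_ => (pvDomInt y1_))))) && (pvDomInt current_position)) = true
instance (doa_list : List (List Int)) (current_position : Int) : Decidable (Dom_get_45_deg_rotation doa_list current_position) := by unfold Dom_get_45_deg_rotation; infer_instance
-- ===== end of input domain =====

-- B replaces A's four filtered re-scans of the flattened list with a single nested pass
-- that builds a 4-entry quadrant count table keyed by i // 90, then a first-match argmax scan.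


-- ===== PORT A =====
def get_45_deg_rotation (doa_list : List (List Int)) (current_position : Int) : Int :=
  let flatten_list := doa_list.flatten
  let first_quadrant : Int := ((flatten_list.filter (fun i => decide (0 ≤ i ∧ i < 90))).length : Int)
  let second_quadrant : Int := ((flatten_list.filter (fun i => decide (90 ≤ i ∧ i < 180))).length : Int)
  let third_quadrant : Int := ((flatten_list.filter (fun i => decide (180 ≤ i ∧ i < 270))).length : Int)
  let fourth_quadrant : Int := ((flatten_list.filter (fun i => decide (270 ≤ i ∧ i < 360))).length : Int)
  -- Python's max on the literal nonempty 4-list; max? is some here, getD 0 is never used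
  let max_quadrant : Int := (PySem.List.max? [first_quadrant, second_quadrant, third_quadrant, fourth_quadrant] (fun y => y)).getD 0
  let angle : Int :=
    if max_quadrant = first_quadrant then 315
    else if max_quadrant = second_quadrant then 45
    else if max_quadrant = third_quadrant then 135
    else if max_quadrant = fourth_quadrant then 225
    else 0
  angle - current_position

-- ===== PORT B =====
-- counts[i // 90] += 1 for in-range i
def pvBStep (counts : List Int) (i : Int) : List Int :=
  if 0 ≤ i ∧ i < 360 then
    let q := PySem.Int.floordiv i 90
    PySem.List.pySetD counts q (PySem.List.pyGetD counts q 0 + 1)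
  else counts

def get_45_deg_rotation_alt (doa_list : List (List Int)) (current_position : Int) : Int :=
  let counts := doa_list.foldl (fun c sub => sub.foldl pvBStep c) [0, 0, 0, 0]
  let st := [((1 : Int), (45 : Int)), (2, 135), (3, 225)].foldl
    (fun (st : Int × Int) qa =>
      let cq := PySem.List.pyGetD counts qa.1 0
      if st.2 < cq then (qa.2, cq) else st)
    (315, PySem.List.pyGetD counts 0 0)
  st.1 - current_position

-- ===== PRECONDITION & SPEC =====
def Spec_get_45_deg_rotation (doa_list : List (List Int)) (current_position : Int) (out : Int) : Prop := out = get_45_deg_rotation_alt doa_list current_position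
instance (doa_list : List (List Int)) (current_position : Int) (out : Int) : Decidable (Spec_get_45_deg_rotation doa_list current_position out) := by unfold Spec_get_45_deg_rotation; infer_instance

-- ===== CLAIM (what is proved, stated in full; the proofs are below) =====
def Claim_equal_get_45_deg_rotation : Prop := ∀ (doa_list : List (List Int)) (current_position : Int), Dom_get_45_deg_rotation doa_list current_position → Spec_get_45_deg_rotation doa_list current_position (get_45_deg_rotation doa_list current_position)

-- ===== LEMMAS AND PROOFS =====

-- the nested count fold equals four filter-counts added to the start table
theorem pvB_counts (xs : List Int) (a b c d : Int) :
    xs.foldl pvBStep [a, b, c, d] =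
      [a + ((xs.filter (fun i => decide (0 ≤ i) && decide (i < 90))).length : Int),
       b + ((xs.filter (fun i => decide (90 ≤ i) && decide (i < 180))).length : Int),
       c + ((xs.filter (fun i => decide (180 ≤ i) && decide (i < 270))).length : Int),
       d + ((xs.filter (fun i => decide (270 ≤ i) && decide (i < 360))).length : Int)] := by
  induction xs generalizing a b c d with
  | nil => simp
  | cons x t ih =>
    simp only [List.foldl_cons]
    by_cases hx : 0 ≤ x ∧ x < 360
    · have hq : PySem.Int.floordiv x 90 = 0 ∨ PySem.Int.floordiv x 90 = 1 ∨
          PySem.Int.floordiv x 90 = 2 ∨ PySem.Int.floordiv x 90 = 3 := by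
        rcases hx with ⟨h0, h360⟩
        by_cases h1 : x < 90
        · left; rw [PySem.Int.floordiv_eq_iff_of_pos (by omega)]; omega
        by_cases h2 : x < 180
        · right; left; rw [PySem.Int.floordiv_eq_iff_of_pos (by omega)]; omega
        by_cases h3 : x < 270
        · right; right; left; rw [PySem.Int.floordiv_eq_iff_of_pos (by omega)]; omega
        · right; right; right; rw [PySem.Int.floordiv_eq_iff_of_pos (by omega)]; omega
      have hb : (PySem.Int.floordiv x 90) * 90 ≤ x ∧ x < (PySem.Int.floordiv x 90 + 1) * 90 := by
        rw [← PySem.Int.floordiv_eq_iff_of_pos (by omega)]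
      rcases hq with h | h | h | h <;>
        · rw [h] at hb
          simp only [pvBStep]
          rw [if_pos hx, h]
          norm_num [PySem.List.pySetD, PySem.List.pySet?, PySem.List.pyGetD,
            PySem.List.pyIdx?]
          simp [ih, List.filter_cons]
          try split_ifs <;> try norm_num
          all_goals omega
    · have e1 : pvBStep [a, b, c, d] x = [a, b, c, d] := by simp [pvBStep, hx]
      rw [e1, ih]
      push Not at hx
      simp only [List.filter_cons]
      split_ifs <;> first | rfl | (simp_all; omega)

theorem get_45_deg_rotation_spec : Claim_equal_get_45_deg_rotation := by
  intro doa_list current_position _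
  unfold Spec_get_45_deg_rotation get_45_deg_rotation get_45_deg_rotation_alt
  simp only [Bool.decide_and]
  rw [show (fun (c : List Int) (sub : List Int) => sub.foldl pvBStep c) =
        (fun c sub => List.foldl pvBStep c sub) from rfl,
      ← List.foldl_flatten, pvB_counts]
  set n0 : Int := ((doa_list.flatten.filter (fun i => decide (0 ≤ i) && decide (i < 90))).length : Int) with hn0
  set n1 : Int := ((doa_list.flatten.filter (fun i => decide (90 ≤ i) && decide (i < 180))).length : Int) with hn1
  set n2 : Int := ((doa_list.flatten.filter (fun i => decide (180 ≤ i) && decide (i < 270))).length : Int) with hn2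
  set n3 : Int := ((doa_list.flatten.filter (fun i => decide (270 ≤ i) && decide (i < 360))).length : Int) with hn3
  simp only [PySem.List.max?_id_cons, List.foldl_cons, List.foldl_nil, Option.getD_some]
  simp [PySem.List.pyGetD]
  norm_num [max_def]
  split_ifs <;> omega

-- ===== VERDICT (by name: the statement is the Claim_ definition above) =====
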